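-- pv_equiv track=rewrite | github.com/ekaaiurgaa-glitch/JAYTI | goals/views.py | parse_manual_task_extraction
-- ===== SOURCE A (Python) =====
-- def parse_manual_task_extraction(ai_content):
--     """Manual parsing if JSON extraction fails"""
--     tasks = []
--     lines = ai_content.split('\n')
--
--     current_task = {}
--     for line in lines:
--         line = line.strip()
--         if not line:
--             continue
--
--         # Look for department indicators
--         if any(dept in line.lower() for dept in ['strategy:', 'finance:', 'hr:', 'operations:', 'sales:']):
--             if current_task.get('title'):
--                 tasks.append(current_task)
--             current_task = {
--                 'department': line.split(':')[0].lower().strip(),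
--                 'title': line.split(':', 1)[1].strip() if ':' in line else line,
--                 'description': '',
--                 'priority': 'medium',
--                 'timeframe': 'week 1'
--             }
--         elif current_task.get('title') and not current_task.get('description'):
--             current_task['description'] = line
--
--     if current_task.get('title'):
--         tasks.append(current_task)
--
--     return tasks if tasks else None
-- ===== SOURCE B (Python) =====
-- _MARKERS = ('strategy:', 'finance:', 'hr:', 'operations:', 'sales:')
--
--
-- def _is_header(s):
--     return any(m in s.lower() for m in _MARKERS)
--
--
-- def parse_manual_task_extraction(ai_content):
--     """Block-based parsing: split the stripped lines into header-led blocks."""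
--     lines = [l.strip() for l in ai_content.split('\n')]
--     # discard everything before the first header line
--     while lines and not _is_header(lines[0]):
--         lines = lines[1:]
--     tasks = []
--     while lines:
--         header, rest = lines[0], lines[1:]
--         body = []
--         while rest and not _is_header(rest[0]):
--             body.append(rest[0])
--             rest = rest[1:]
--         title = header.split(':', 1)[1].strip()
--         if title:
--             tasks.append({
--                 'department': header.split(':')[0].lower().strip(),
--                 'title': title,
--                 'description': next((s for s in body if s), ''),
--                 'priority': 'medium',
--                 'timeframe': 'week 1',
--             })
--         lines = rest
--     return tasks or None
-- ===== Notes on version B (the rewrite author's own statement) =====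
-- stated objective: alternative
-- what changed: Replaces A's single fold carrying a mutable current-task dict with a block decomposition: drop the lines before the first header, then recurse header-by-header, taking each block's first non-empty line as the description.
import Mathlib
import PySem

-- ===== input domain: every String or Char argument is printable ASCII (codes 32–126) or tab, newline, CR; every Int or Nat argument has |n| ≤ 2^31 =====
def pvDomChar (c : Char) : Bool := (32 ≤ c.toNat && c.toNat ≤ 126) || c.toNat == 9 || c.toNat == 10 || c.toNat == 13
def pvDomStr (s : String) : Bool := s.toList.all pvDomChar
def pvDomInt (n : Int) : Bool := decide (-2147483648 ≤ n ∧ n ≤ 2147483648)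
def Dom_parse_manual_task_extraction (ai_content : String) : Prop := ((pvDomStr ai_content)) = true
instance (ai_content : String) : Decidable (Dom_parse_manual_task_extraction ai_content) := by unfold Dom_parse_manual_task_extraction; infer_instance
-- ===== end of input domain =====

-- B re-parses by blocks: it drops the prefix before the first header line and then recurses
-- header-by-header, taking each block's first non-empty line as the description (objective:
-- alternative decomposition, same cost); A folds over the lines with a mutable current-task dict.

-- ===== PORT A =====
def pmtMarkersA : List String := ["strategy:", "finance:", "hr:", "operations:", "sales:"]

def pmtIsHeaderA (line : String) : Bool :=
  pmtMarkersA.any (fun dept => PySem.Str.isIn dept (PySem.Str.lower line))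

-- the dict literal A builds at a header line (distinct literal keys, insertion order kept)
def pmtNewTaskA (line : String) : PySem.Dict String String :=
  PySem.Dict.mk
    [("department", PySem.Str.strip (PySem.Str.lower (((PySem.Str.split? line ":").getD []).headD ""))),
     ("title", if PySem.Str.isIn ":" line then
                 PySem.Str.strip (((PySem.Str.splitMax? line ":" 1).getD []).getD 1 "")
               else line),
     ("description", ""),
     ("priority", "medium"),
     ("timeframe", "week 1")]

-- one iteration of A's for-loop; state = (tasks so far, current_task)
def pmtStepA (st : List (PySem.Dict String String) × PySem.Dict String String) (l : String) :
    List (PySem.Dict String String) × PySem.Dict String String :=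
  let line := PySem.Str.strip l
  if line = "" then st
  else if pmtIsHeaderA line then
    ((if st.2.getD "title" "" ≠ "" then st.1 ++ [st.2] else st.1), pmtNewTaskA line)
  else if st.2.getD "title" "" ≠ "" ∧ st.2.getD "description" "" = "" then
    (st.1, st.2.insert "description" line)
  else st

def parse_manual_task_extraction (ai_content : String) : Option (List (List (String × String))) :=
  let lines := (PySem.Str.split? ai_content "\n").getD []
  let st := lines.foldl pmtStepA ([], PySem.Dict.mk [])
  let tasks := if st.2.getD "title" "" ≠ "" then st.1 ++ [st.2] else st.1
  if tasks = [] then none else some (tasks.map PySem.Dict.items)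

-- ===== PORT B =====
def pmtMarkersB : List String := ["strategy:", "finance:", "hr:", "operations:", "sales:"]

def pmtIsHeaderB (s : String) : Bool :=
  pmtMarkersB.any (fun m => PySem.Str.isIn m (PySem.Str.lower s))

def pmtTitleB (header : String) : String :=
  PySem.Str.strip (((PySem.Str.splitMax? header ":" 1).getD []).getD 1 "")

def pmtTaskB (header desc : String) : List (String × String) :=
  [("department", PySem.Str.strip (PySem.Str.lower (((PySem.Str.split? header ":").getD []).headD ""))),
   ("title", pmtTitleB header),
   ("description", desc),
   ("priority", "medium"),
   ("timeframe", "week 1")]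

-- the second while-loop of B: one header-led block per recursive step
def pmtBlocksB : List String → List (List (String × String))
  | [] => []
  | header :: rest =>
    (if pmtTitleB header ≠ "" then
       [pmtTaskB header (((rest.takeWhile (fun s => !pmtIsHeaderB s)).find? (fun s => s != "")).getD "")]
     else [])
    ++ pmtBlocksB (rest.dropWhile (fun s => !pmtIsHeaderB s))
termination_by l => l.length
decreasing_by simpa [Nat.lt_succ_iff] using List.length_dropWhile_le (fun s => !pmtIsHeaderB s) rest

def parse_manual_task_extraction_alt (ai_content : String) : Option (List (List (String × String))) :=
  let lines := ((PySem.Str.split? ai_content "\n").getD []).map PySem.Str.strip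
  let tasks := pmtBlocksB (lines.dropWhile (fun s => !pmtIsHeaderB s))
  if tasks = [] then none else some tasks

-- ===== PRECONDITION & SPEC =====
def Spec_parse_manual_task_extraction (ai_content : String) (out : Option (List (List (String × String)))) : Prop := out = parse_manual_task_extraction_alt ai_content
instance (ai_content : String) (out : Option (List (List (String × String)))) : Decidable (Spec_parse_manual_task_extraction ai_content out) := by unfold Spec_parse_manual_task_extraction; infer_instance

-- ===== CLAIM (what is proved, stated in full; the proofs are below) =====
def Claim_equal_parse_manual_task_extraction : Prop := ∀ (ai_content : String), Dom_parse_manual_task_extraction ai_content → Spec_parse_manual_task_extraction ai_content (parse_manual_task_extraction ai_content)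

-- ===== LEMMAS AND PROOFS =====

-- A's loop step on an already-stripped line
def pmtStepCore (st : List (PySem.Dict String String) × PySem.Dict String String) (line : String) :
    List (PySem.Dict String String) × PySem.Dict String String :=
  if line = "" then st
  else if pmtIsHeaderA line then
    ((if st.2.getD "title" "" ≠ "" then st.1 ++ [st.2] else st.1), pmtNewTaskA line)
  else if st.2.getD "title" "" ≠ "" ∧ st.2.getD "description" "" = "" then
    (st.1, st.2.insert "description" line)
  else st

lemma stepA_eq : pmtStepA = fun st l => pmtStepCore st (PySem.Str.strip l) := rfl

lemma headerA_eq (s : String) : pmtIsHeaderA s = pmtIsHeaderB s := rfl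

lemma headerB_empty : pmtIsHeaderB "" = false := by decide

-- A's current_task dict, abstracted over the three varying values
def pmtMkT (d t s : String) : PySem.Dict String String :=
  PySem.Dict.mk [("department", d), ("title", t), ("description", s), ("priority", "medium"), ("timeframe", "week 1")]

def pmtDeptE (line : String) : String :=
  PySem.Str.strip (PySem.Str.lower (((PySem.Str.split? line ":").getD []).headD ""))

def pmtTitleAE (line : String) : String :=
  if PySem.Str.isIn ":" line then
    PySem.Str.strip (((PySem.Str.splitMax? line ":" 1).getD []).getD 1 "")
  else line

lemma newTaskA_eq (line : String) : pmtNewTaskA line = pmtMkT (pmtDeptE line) (pmtTitleAE line) "" := rfl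

lemma mkT_title (d t s : String) : (pmtMkT d t s).getD "title" "" = t := by
  simp [pmtMkT, PySem.Dict.getD_eq_get?_getD, PySem.Dict.get?_mk_cons]

lemma mkT_desc (d t s : String) : (pmtMkT d t s).getD "description" "" = s := by
  simp [pmtMkT, PySem.Dict.getD_eq_get?_getD, PySem.Dict.get?_mk_cons]

lemma mkT_insert (d t s s' : String) : (pmtMkT d t s).insert "description" s' = pmtMkT d t s' := by
  apply PySem.Dict.ext
  rw [PySem.Dict.items_insert_of_contains]
  · simp [pmtMkT]
  · simp [pmtMkT, PySem.Dict.contains_mk]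

lemma empty_title : (PySem.Dict.mk ([] : List (String × String))).getD "title" "" = "" := rfl

lemma lowerChar_colon (c : Char) (h : PySem.Chars.lowerChar c = ':') : c = ':' := by
  unfold PySem.Chars.lowerChar PySem.Chars.isupper at h
  split at h
  · next hc =>
    exfalso
    simp only [Bool.and_eq_true, decide_eq_true_eq, Char.le_def, UInt32.le_iff_toNat_le] at hc
    have hv : 65 ≤ c.toNat ∧ c.toNat ≤ 90 := by
      have hA : ('A' : Char).val.toNat = 65 := rfl
      have hZ : ('Z' : Char).val.toNat = 90 := rfl
      unfold Char.toNat; omega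
    have hvalid : (c.toNat + 32).isValidChar := by left; omega
    have h2 := congrArg Char.toNat h
    rw [Char.toNat_ofNat] at h2
    simp [hvalid] at h2
    have : (':' : Char).toNat = 58 := rfl
    omega
  · exact h

-- every header line contains a colon
lemma colon_of_header (s : String) (h : pmtIsHeaderB s = true) : PySem.Str.isIn ":" s = true := by
  unfold pmtIsHeaderB pmtMarkersB at h
  rw [List.any_eq_true] at h
  obtain ⟨d, hd, hin⟩ := h
  rw [PySem.Str.isIn_iff_infix] at hin
  have hcolon : ':' ∈ d.toList := by
    fin_cases hd <;> decide
  have h1 : ':' ∈ (PySem.Str.lower s).toList := hin.subset hcolon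
  rw [PySem.Str.toList_lower] at h1
  unfold PySem.Chars.lower at h1
  obtain ⟨c, hc, hlc⟩ := List.mem_map.mp h1
  have hceq : c = ':' := lowerChar_colon c hlc
  subst hceq
  obtain ⟨s1, t1, hst⟩ := List.mem_iff_append.mp hc
  rw [PySem.Str.isIn_iff_infix]
  exact ⟨s1, t1, by rw [hst]; simp⟩

lemma titleB_eq (line : String) (h : pmtIsHeaderB line = true) : pmtTitleB line = pmtTitleAE line := by
  unfold pmtTitleB pmtTitleAE
  rw [if_pos (colon_of_header line h)]

lemma taskB_eq (line desc : String) (h : pmtIsHeaderB line = true) :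
    pmtTaskB line desc = (pmtMkT (pmtDeptE line) (pmtTitleAE line) desc).items := by
  simp [pmtTaskB, pmtMkT, pmtDeptE, titleB_eq line h]

-- non-header lines leave the state unchanged while the current task's title is falsy
lemma foldl_skip (pre : List String) (hpre : ∀ s ∈ pre, pmtIsHeaderB s = false)
    (ts : List (PySem.Dict String String)) (cur : PySem.Dict String String)
    (hcur : cur.getD "title" "" = "") :
    pre.foldl pmtStepCore (ts, cur) = (ts, cur) := by
  induction pre with
  | nil => rfl
  | cons s pre ih =>
    have hs : pmtIsHeaderB s = false := hpre s (List.mem_cons_self ..)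
    have hstep : pmtStepCore (ts, cur) s = (ts, cur) := by
      by_cases he : s = ""
      · simp [pmtStepCore, he]
      · simp [pmtStepCore, he, headerA_eq, hs, hcur]
    rw [List.foldl_cons, hstep]
    exact ih (fun x hx => hpre x (List.mem_cons_of_mem _ hx))

-- non-header lines leave the state unchanged once title and description are set
lemma foldl_done (body : List String) (hb : ∀ s ∈ body, pmtIsHeaderB s = false)
    (ts : List (PySem.Dict String String)) (d t desc : String) (hd : desc ≠ "") :
    body.foldl pmtStepCore (ts, pmtMkT d t desc) = (ts, pmtMkT d t desc) := by
  induction body with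
  | nil => rfl
  | cons s body ih =>
    have hs : pmtIsHeaderB s = false := hb s (List.mem_cons_self ..)
    have hstep : pmtStepCore (ts, pmtMkT d t desc) s = (ts, pmtMkT d t desc) := by
      by_cases he : s = ""
      · simp [pmtStepCore, he]
      · simp [pmtStepCore, he, headerA_eq, hs, mkT_title, mkT_desc, hd]
    rw [List.foldl_cons, hstep]
    exact ih (fun x hx => hb x (List.mem_cons_of_mem _ hx))

-- over a block body the description becomes its first non-empty line
lemma foldl_body (body : List String) (hb : ∀ s ∈ body, pmtIsHeaderB s = false)
    (ts : List (PySem.Dict String String)) (d t : String) (ht : t ≠ "") :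
    body.foldl pmtStepCore (ts, pmtMkT d t "") =
      (ts, pmtMkT d t ((body.find? (fun s => s != "")).getD "")) := by
  induction body with
  | nil => rfl
  | cons s body ih =>
    by_cases he : s = ""
    · have hstep : pmtStepCore (ts, pmtMkT d t "") s = (ts, pmtMkT d t "") := by
        simp [pmtStepCore, he]
      rw [List.foldl_cons, hstep, ih (fun x hx => hb x (List.mem_cons_of_mem _ hx))]
      have hseq : (s != "") = false := by simp [he]
      simp [List.find?, hseq]
    · have hs : pmtIsHeaderB s = false := hb s (List.mem_cons_self ..)
      have hstep : pmtStepCore (ts, pmtMkT d t "") s = (ts, pmtMkT d t s) := by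
        simp [pmtStepCore, he, headerA_eq, hs, mkT_title, mkT_desc, ht, mkT_insert]
      rw [List.foldl_cons, hstep,
        foldl_done body (fun x hx => hb x (List.mem_cons_of_mem _ hx)) ts d t s he]
      have hsne : (s != "") = true := by simpa using he
      simp [List.find?, hsne]

def pmtFin (st : List (PySem.Dict String String) × PySem.Dict String String) :
    List (PySem.Dict String String) :=
  if st.2.getD "title" "" ≠ "" then st.1 ++ [st.2] else st.1

lemma dw_spec {α : Type} (p : α → Bool) (l : List α) :
    l.dropWhile p = [] ∨ ∃ hd tl, l.dropWhile p = hd :: tl ∧ p hd = false := by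
  induction l with
  | nil => left; rfl
  | cons a l ih =>
    by_cases h : p a
    · simpa [h] using ih
    · right; exact ⟨a, l, by simp [h], by simp [h]⟩

-- main correspondence: from any state, A's fold over a header-led tail appends exactly B's blocks
lemma pmt_main : ∀ (n : Nat) (sls : List String), sls.length ≤ n →
    (sls = [] ∨ ∃ hd tl, sls = hd :: tl ∧ pmtIsHeaderB hd = true) →
    ∀ (ts : List (PySem.Dict String String)) (cur : PySem.Dict String String),
    (pmtFin (sls.foldl pmtStepCore (ts, cur))).map PySem.Dict.items
      = (pmtFin (ts, cur)).map PySem.Dict.items ++ pmtBlocksB sls := by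
  intro n
  induction n with
  | zero =>
    intro sls hlen hshape ts cur
    have : sls = [] := List.length_eq_zero_iff.mp (Nat.le_zero.mp hlen)
    subst this
    simp [pmtBlocksB]
  | succ n ih =>
    intro sls hlen hshape ts cur
    rcases hshape with rfl | ⟨hd, tl, rfl, hhd⟩
    · simp [pmtBlocksB]
    · have hne : hd ≠ "" := by
        intro h; rw [h, headerB_empty] at hhd; exact absurd hhd (by simp)
      have hstep : pmtStepCore (ts, cur) hd = (pmtFin (ts, cur), pmtNewTaskA hd) := by
        simp [pmtStepCore, hne, headerA_eq, hhd, pmtFin]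
      have hsplit : tl = tl.takeWhile (fun s => !pmtIsHeaderB s) ++ tl.dropWhile (fun s => !pmtIsHeaderB s) :=
        (List.takeWhile_append_dropWhile).symm
      have hbody : ∀ s ∈ tl.takeWhile (fun s => !pmtIsHeaderB s), pmtIsHeaderB s = false := by
        intro s hs
        have := List.mem_takeWhile_imp hs
        simpa using this
      have hrest : tl.dropWhile (fun s => !pmtIsHeaderB s) = [] ∨
          ∃ h' t', tl.dropWhile (fun s => !pmtIsHeaderB s) = h' :: t' ∧ pmtIsHeaderB h' = true := by
        rcases dw_spec (fun s => !pmtIsHeaderB s) tl with h | ⟨h', t', heq, hp⟩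
        · left; exact h
        · right; exact ⟨h', t', heq, by simpa using hp⟩
      have hlen' : (tl.dropWhile (fun s => !pmtIsHeaderB s)).length ≤ n := by
        have h1 := List.length_dropWhile_le (fun s => !pmtIsHeaderB s) tl
        simp at hlen; omega
      rw [List.foldl_cons, hstep, newTaskA_eq]
      by_cases hT : pmtTitleAE hd = ""
      · rw [hT]
        conv_lhs => rw [hsplit]
        rw [List.foldl_append,
          foldl_skip _ hbody _ _ (by rw [mkT_title]),
          ih _ hlen' hrest _ _]
        have hfin : pmtFin (pmtFin (ts, cur), pmtMkT (pmtDeptE hd) "" "") = pmtFin (ts, cur) := by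
          simp [pmtFin, mkT_title]
        rw [hfin]
        have hBt : pmtTitleB hd = "" := by rw [titleB_eq hd hhd, hT]
        simp [pmtBlocksB, hBt]
      · conv_lhs => rw [hsplit]
        rw [List.foldl_append, foldl_body _ hbody _ _ _ hT, ih _ hlen' hrest _ _]
        have hfin : pmtFin (pmtFin (ts, cur),
            pmtMkT (pmtDeptE hd) (pmtTitleAE hd) (((tl.takeWhile (fun s => !pmtIsHeaderB s)).find? (fun s => s != "")).getD ""))
            = pmtFin (ts, cur) ++ [pmtMkT (pmtDeptE hd) (pmtTitleAE hd) (((tl.takeWhile (fun s => !pmtIsHeaderB s)).find? (fun s => s != "")).getD "")] := by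
          simp [pmtFin, mkT_title, hT]
        rw [hfin]
        have hBt : pmtTitleB hd ≠ "" := by rw [titleB_eq hd hhd]; exact hT
        simp [pmtBlocksB, hBt, taskB_eq hd _ hhd]

-- ===== VERDICT (by name: the statement is the Claim_ definition above) =====
theorem parse_manual_task_extraction_spec : Claim_equal_parse_manual_task_extraction := by
  intro ai_content _
  unfold Spec_parse_manual_task_extraction
  unfold parse_manual_task_extraction parse_manual_task_extraction_alt
  simp only []
  rw [stepA_eq, ← List.foldl_map]
  set sls := ((PySem.Str.split? ai_content "\n").getD []).map PySem.Str.strip with hsls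
  have hsplit : sls = sls.takeWhile (fun s => !pmtIsHeaderB s) ++ sls.dropWhile (fun s => !pmtIsHeaderB s) :=
    (List.takeWhile_append_dropWhile).symm
  have hbody : ∀ s ∈ sls.takeWhile (fun s => !pmtIsHeaderB s), pmtIsHeaderB s = false := by
    intro s hs
    simpa using List.mem_takeWhile_imp hs
  have hrest : sls.dropWhile (fun s => !pmtIsHeaderB s) = [] ∨
      ∃ h' t', sls.dropWhile (fun s => !pmtIsHeaderB s) = h' :: t' ∧ pmtIsHeaderB h' = true := by
    rcases dw_spec (fun s => !pmtIsHeaderB s) sls with h | ⟨h', t', heq, hp⟩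
    · left; exact h
    · right; exact ⟨h', t', heq, by simpa using hp⟩
  conv_lhs => rw [hsplit]
  rw [List.foldl_append, foldl_skip _ hbody _ _ empty_title]
  set G := List.foldl pmtStepCore ([], PySem.Dict.mk []) (sls.dropWhile (fun s => !pmtIsHeaderB s)) with hG
  set tb := pmtBlocksB (sls.dropWhile (fun s => !pmtIsHeaderB s)) with htb
  have key : (pmtFin G).map PySem.Dict.items = tb := by
    rw [hG, pmt_main _ _ (le_refl _) hrest _ _, ← htb]
    simp [pmtFin, empty_title]
  rw [show (if G.2.getD "title" "" ≠ "" then G.1 ++ [G.2] else G.1) = pmtFin G from rfl]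
  by_cases hF : pmtFin G = []
  · have htb0 : tb = [] := by rw [← key, hF]; rfl
    simp [hF, htb0]
  · have htb0 : tb ≠ [] := by rw [← key]; simp [hF]
    simp [hF, htb0, key]
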